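-- pv_equiv track=rewrite | github.com/ucsc-redwood/better-together | scripts-v2/plot/schedule_occupancy.py | create_chunk_labels
-- ===== SOURCE A (Python) =====
-- def create_chunk_labels(max_chunk_id, chunk_types, schedule_annotations):
--     """Create labels for chunks based on their types and schedule annotations."""
--     chunk_names = []
--     for i in range(max_chunk_id + 1):
--         # Find which core type this chunk belongs to based on schedule annotations
--         core_type = "Unknown"
--         for core, chunks in schedule_annotations.items():
--             if i in chunks:
--                 core_type = core
--                 break
--
--         processor_type = chunk_types.get(i, "Unknown")
--         chunk_names.append(f"Chunk {i} ({processor_type}/{core_type})")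
--
--     return chunk_names
-- ===== SOURCE B (Python) =====
-- def create_chunk_labels(max_chunk_id, chunk_types, schedule_annotations):
--     """Create labels for chunks based on their types and schedule annotations."""
--     # Invert the schedule once: chunk id -> first core that lists it.
--     owner = {}
--     for core, chunks in schedule_annotations.items():
--         for c in chunks:
--             if c not in owner:
--                 owner[c] = core
--     return [
--         f"Chunk {i} ({chunk_types.get(i, 'Unknown')}/{owner.get(i, 'Unknown')})"
--         for i in range(max_chunk_id + 1)
--     ]
-- ===== Notes on version B (the rewrite author's own statement) =====
-- stated objective: faster
-- what changed: B inverts the schedule once into a chunk->core dict (first occurrence wins) and then labels each chunk with one O(1) lookup, instead of rescanning every core's chunk list for every chunk id.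
import Mathlib
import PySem

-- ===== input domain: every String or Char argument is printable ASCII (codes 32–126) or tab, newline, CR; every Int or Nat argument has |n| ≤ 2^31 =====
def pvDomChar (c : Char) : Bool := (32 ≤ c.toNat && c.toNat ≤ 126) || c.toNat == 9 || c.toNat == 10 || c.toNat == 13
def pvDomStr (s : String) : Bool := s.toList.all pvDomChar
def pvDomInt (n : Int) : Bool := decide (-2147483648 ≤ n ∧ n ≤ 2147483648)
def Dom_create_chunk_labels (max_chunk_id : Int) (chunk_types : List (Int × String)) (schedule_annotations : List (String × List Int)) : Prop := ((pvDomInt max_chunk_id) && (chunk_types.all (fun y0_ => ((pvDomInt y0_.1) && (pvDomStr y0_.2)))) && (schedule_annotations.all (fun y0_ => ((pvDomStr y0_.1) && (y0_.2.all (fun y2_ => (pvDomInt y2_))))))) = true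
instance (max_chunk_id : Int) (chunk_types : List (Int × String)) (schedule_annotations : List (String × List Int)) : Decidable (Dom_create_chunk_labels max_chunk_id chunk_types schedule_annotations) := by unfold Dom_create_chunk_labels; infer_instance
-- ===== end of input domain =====

-- B inverts the schedule once into a chunk→core dict (first occurrence wins) and labels each
-- chunk with one lookup, instead of rescanning every core's chunk list for every chunk id.

-- ===== PORT A =====

-- dict.get(k, dflt) under the association-list convention (first match)
def pyDictGetD (d : List (Int × String)) (k : Int) (dflt : String) : String :=
  match d with
  | [] => dflt
  | (k', v) :: rest => if k' == k then v else pyDictGetD rest k dflt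

-- A's inner loop: core_type = "Unknown"; for core, chunks in items: if i in chunks: core_type = core; break
def aFindCore (sa : List (String × List Int)) (i : Int) : String :=
  match sa with
  | [] => "Unknown"
  | (core, chunks) :: rest => if chunks.contains i then core else aFindCore rest i

def create_chunk_labels (max_chunk_id : Int) (chunk_types : List (Int × String)) (schedule_annotations : List (String × List Int)) : List String :=
  (PySem.List.pyRange 0 (max_chunk_id + 1) 1).foldl
    (fun chunk_names i =>
      let core_type := aFindCore schedule_annotations i
      let processor_type := pyDictGetD chunk_types i "Unknown"
      chunk_names ++ ["Chunk " ++ PySem.Int.toStr i ++ " (" ++ processor_type ++ "/" ++ core_type ++ ")"])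
    []

-- ===== PORT B =====

-- owner = {}; for core, chunks in items: for c in chunks: if c not in owner: owner[c] = core
def bOwner (sa : List (String × List Int)) : PySem.Dict Int String :=
  sa.foldl
    (fun d p => p.2.foldl (fun d c => if d.contains c then d else d.insert c p.1) d)
    PySem.Dict.empty

def create_chunk_labels_alt (max_chunk_id : Int) (chunk_types : List (Int × String)) (schedule_annotations : List (String × List Int)) : List String :=
  let owner := bOwner schedule_annotations
  (PySem.List.pyRange 0 (max_chunk_id + 1) 1).map
    (fun i => "Chunk " ++ PySem.Int.toStr i ++ " (" ++ pyDictGetD chunk_types i "Unknown" ++ "/" ++ owner.getD i "Unknown" ++ ")")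

-- ===== PRECONDITION & SPEC =====
def Spec_create_chunk_labels (max_chunk_id : Int) (chunk_types : List (Int × String)) (schedule_annotations : List (String × List Int)) (out : List String) : Prop := out = create_chunk_labels_alt max_chunk_id chunk_types schedule_annotations
instance (max_chunk_id : Int) (chunk_types : List (Int × String)) (schedule_annotations : List (String × List Int)) (out : List String) : Decidable (Spec_create_chunk_labels max_chunk_id chunk_types schedule_annotations out) := by unfold Spec_create_chunk_labels; infer_instance

-- ===== CLAIM (what is proved, stated in full; the proofs are below) =====
def Claim_equal_create_chunk_labels : Prop := ∀ (max_chunk_id : Int) (chunk_types : List (Int × String)) (schedule_annotations : List (String × List Int)), Dom_create_chunk_labels max_chunk_id chunk_types schedule_annotations → Spec_create_chunk_labels max_chunk_id chunk_types schedule_annotations (create_chunk_labels max_chunk_id chunk_types schedule_annotations)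

-- ===== LEMMAS AND PROOFS =====

-- first core (in list order) whose chunk list contains i, as an Option
def findCore? (sa : List (String × List Int)) (i : Int) : Option String :=
  match sa with
  | [] => none
  | (core, chunks) :: rest => if chunks.contains i then some core else findCore? rest i

lemma aFindCore_eq_findCore? (sa : List (String × List Int)) (i : Int) :
    aFindCore sa i = (findCore? sa i).getD "Unknown" := by
  induction sa with
  | nil => rfl
  | cons p rest ih =>
    obtain ⟨core, chunks⟩ := p
    simp only [aFindCore, findCore?]
    split <;> simp [ih]

lemma inner_fold_get? (chunks : List Int) (core : String) (d : PySem.Dict Int String) (x : Int) :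
    (chunks.foldl (fun d c => if d.contains c then d else d.insert c core) d).get? x
      = (d.get? x).or (if chunks.contains x then some core else none) := by
  induction chunks generalizing d with
  | nil => simp
  | cons c rest ih =>
    simp only [List.foldl_cons, ih]
    by_cases hcx : c = x
    · subst hcx
      by_cases hc : d.contains c = true
      · have hs : (d.get? c).isSome := by rw [← PySem.Dict.contains_eq_isSome_get?]; exact hc
        obtain ⟨v, hv⟩ := Option.isSome_iff_exists.mp hs
        simp [hc, hv]
      · have hn : d.get? c = none := by
          have := PySem.Dict.contains_eq_isSome_get? d c
          cases h : d.get? c with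
          | none => rfl
          | some v => rw [h] at this; simp at this; exact absurd this hc
        simp [hc, hn, PySem.Dict.get?_insert_self]
    · have hne : x ≠ c := fun h => hcx h.symm
      by_cases hc : d.contains c = true
      · simp [hc, Ne.symm hcx]
      · rw [if_neg hc, PySem.Dict.get?_insert_of_ne d core hne]
        simp [Ne.symm hcx]

lemma bOwner_get? (sa : List (String × List Int)) (d : PySem.Dict Int String) (x : Int) :
    (sa.foldl (fun d p => p.2.foldl (fun d c => if d.contains c then d else d.insert c p.1) d) d).get? x
      = (d.get? x).or (findCore? sa x) := by
  induction sa generalizing d with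
  | nil => simp [findCore?]
  | cons p rest ih =>
    obtain ⟨core, chunks⟩ := p
    simp only [List.foldl_cons, ih, inner_fold_get?, findCore?, Option.or_assoc]
    congr 1
    split <;> simp

lemma bOwner_getD (sa : List (String × List Int)) (x : Int) :
    (bOwner sa).getD x "Unknown" = aFindCore sa x := by
  rw [PySem.Dict.getD_eq_get?_getD, bOwner, bOwner_get?, aFindCore_eq_findCore?]
  simp

-- ===== VERDICT (by name: the statement is the Claim_ definition above) =====
theorem create_chunk_labels_spec : Claim_equal_create_chunk_labels := by
  intro m ct sa _
  unfold Spec_create_chunk_labels create_chunk_labels create_chunk_labels_alt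
  rw [PySem.List.foldl_append_singleton_eq_map]
  simp only [List.nil_append]
  exact List.map_congr_left (fun i _ => by rw [bOwner_getD])
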